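-- pv_equiv track=rewrite | github.com/fkie-cad/FACT_core | src/plugins/analysis/ip_and_uri_finder_filter/code/ip_and_uri_filter.py | whitelist_ip_and_uris
-- ===== SOURCE A (Python) =====
-- def whitelist_ip_and_uris(allow_list: list, ip_and_uri_list: list) -> list:
--     clean_api_and_uri_list = []
--     for ip_uri in ip_and_uri_list:
--         for entry in allow_list:
--             if entry in ip_uri.lower():
--                 if ip_uri not in clean_api_and_uri_list:
--                     clean_api_and_uri_list.append(ip_uri)
--     return clean_api_and_uri_list
-- ===== SOURCE B (Python) =====
-- def whitelist_ip_and_uris(allow_list: list, ip_and_uri_list: list) -> list: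
--     # Pattern-major pass: lowercase each item once, then for each allow-list
--     # entry mark the indices of items containing it; finally emit the items
--     # whose index was marked, in original order, deduplicated by value.
--     lows = [u.lower() for u in ip_and_uri_list]
--     matched = set()
--     for entry in allow_list:
--         for i, low in enumerate(lows):
--             if entry in low:
--                 matched.add(i)
--     seen = set()
--     out = []
--     for i, u in enumerate(ip_and_uri_list):
--         if i in matched and u not in seen:
--             seen.add(u)
--             out.append(u)
--     return out
-- ===== Notes on version B (the rewrite author's own statement) =====
-- stated objective: alternative
-- what changed: Replaces A's item-major nested scan with dedup by repeated O(n) list-membership scanning by a three-stage pattern-major algorithm: lowercase every item once, sweep each allow-list entry over all items marking matched indices in a hash set, then an index-ordered emit pass deduplicating via a hash set; order is preserved because the emit pass follows original indices.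
import Mathlib
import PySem

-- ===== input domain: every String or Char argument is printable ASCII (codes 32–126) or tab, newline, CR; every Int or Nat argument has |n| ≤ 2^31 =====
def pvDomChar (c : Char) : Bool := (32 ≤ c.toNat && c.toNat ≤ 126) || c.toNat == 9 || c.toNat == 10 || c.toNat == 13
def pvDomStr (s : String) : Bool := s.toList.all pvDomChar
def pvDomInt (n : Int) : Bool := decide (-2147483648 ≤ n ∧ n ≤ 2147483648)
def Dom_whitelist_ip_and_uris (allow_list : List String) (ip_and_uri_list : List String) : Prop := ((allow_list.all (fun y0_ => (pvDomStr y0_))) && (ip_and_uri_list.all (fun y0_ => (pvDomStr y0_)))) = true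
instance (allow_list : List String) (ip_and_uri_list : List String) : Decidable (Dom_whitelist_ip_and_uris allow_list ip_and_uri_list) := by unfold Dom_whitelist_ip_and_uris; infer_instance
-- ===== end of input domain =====

-- B: pattern-major three-stage algorithm (lowercase once, mark matched indices per
-- allow-list entry into an index set, then an index-ordered emit pass with hash-set
-- dedup) instead of A's item-major nested scan with list-membership dedup; same value.


-- ===== PORT A =====
def whitelist_ip_and_uris (allow_list : List String) (ip_and_uri_list : List String) : List String :=
  ip_and_uri_list.foldl (fun clean ip_uri =>
    allow_list.foldl (fun clean entry =>
      if PySem.Str.isIn entry (PySem.Str.lower ip_uri) then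
        (if ip_uri ∈ clean then clean else clean ++ [ip_uri])
      else clean) clean) []

-- ===== PORT B =====
def whitelist_ip_and_uris_alt (allow_list : List String) (ip_and_uri_list : List String) : List String :=
  let lows := ip_and_uri_list.map PySem.Str.lower
  let matched := allow_list.foldl (fun (m : PySem.Set Int) entry =>
      (PySem.List.enumerate lows 0).foldl (fun m p =>
        if PySem.Str.isIn entry p.2 then PySem.Set.add m p.1 else m) m) PySem.Set.empty
  ((PySem.List.enumerate ip_and_uri_list 0).foldl
    (fun (st : PySem.Set String × List String) p =>
      if PySem.Set.contains matched p.1 && !PySem.Set.contains st.1 p.2 then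
        (PySem.Set.add st.1 p.2, st.2 ++ [p.2])
      else st) (PySem.Set.empty, [])).2

-- ===== PRECONDITION & SPEC =====
def Spec_whitelist_ip_and_uris (allow_list : List String) (ip_and_uri_list : List String) (out : List String) : Prop := out = whitelist_ip_and_uris_alt allow_list ip_and_uri_list
instance (allow_list : List String) (ip_and_uri_list : List String) (out : List String) : Decidable (Spec_whitelist_ip_and_uris allow_list ip_and_uri_list out) := by unfold Spec_whitelist_ip_and_uris; infer_instance

-- ===== CLAIM =====
def Claim_equal_whitelist_ip_and_uris : Prop := ∀ (allow_list : List String) (ip_and_uri_list : List String), Dom_whitelist_ip_and_uris allow_list ip_and_uri_list → Spec_whitelist_ip_and_uris allow_list ip_and_uri_list (whitelist_ip_and_uris allow_list ip_and_uri_list)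

-- ===== LEMMAS AND PROOFS =====

-- Once x is already in the accumulator, A's inner loop never changes it.
theorem pv_inner_fixed (x : String) (al : List String) (acc : List String) (hx : x ∈ acc) :
    al.foldl (fun clean entry =>
      if PySem.Str.isIn entry (PySem.Str.lower x) then
        (if x ∈ clean then clean else clean ++ [x])
      else clean) acc = acc := by
  induction al with
  | nil => rfl
  | cons e rest ih =>
      simp only [List.foldl_cons]
      by_cases h : PySem.Str.isIn e (PySem.Str.lower x) = true
      · rw [if_pos h, if_pos hx]; exact ih
      · rw [if_neg h]; exact ih

-- A's inner loop appends x iff some allow-list entry matches and x is new.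
theorem pv_inner_eq (x : String) (al : List String) (acc : List String) :
    al.foldl (fun clean entry =>
      if PySem.Str.isIn entry (PySem.Str.lower x) then
        (if x ∈ clean then clean else clean ++ [x])
      else clean) acc
    = if al.any (fun entry => PySem.Str.isIn entry (PySem.Str.lower x)) then
        (if x ∈ acc then acc else acc ++ [x])
      else acc := by
  induction al generalizing acc with
  | nil => rfl
  | cons e rest ih =>
      simp only [List.foldl_cons, List.any_cons]
      by_cases h : PySem.Str.isIn e (PySem.Str.lower x) = true
      · rw [if_pos h]
        simp only [h, Bool.true_or]
        rw [if_pos trivial]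
        by_cases hx : x ∈ acc
        · rw [if_pos hx]; exact pv_inner_fixed x rest acc hx
        · rw [if_neg hx]; exact pv_inner_fixed x rest (acc ++ [x]) (by simp)
      · have h' : PySem.Str.isIn e (PySem.Str.lower x) = false := by simpa using h
        rw [if_neg h]
        simp only [h', Bool.false_or]
        exact ih acc

-- Membership after one entry's marking sweep.
theorem pv_mark_one (e : String) (ps : List (Int × String)) (m : PySem.Set Int) (i : Int) :
    (i ∈ ps.foldl (fun m p => if PySem.Str.isIn e p.2 then PySem.Set.add m p.1 else m) m)
    ↔ i ∈ m ∨ ∃ p ∈ ps, p.1 = i ∧ PySem.Str.isIn e p.2 = true := by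
  induction ps generalizing m with
  | nil => simp
  | cons q rest ih =>
      simp only [List.foldl_cons]
      by_cases h : PySem.Str.isIn e q.2 = true
      · rw [if_pos h, ih]
        simp only [PySem.Set.mem_add]
        constructor
        · rintro (⟨hm | hq⟩ | ⟨p, hp, h1, h2⟩)
          · exact Or.inl hm
          · exact Or.inr ⟨q, by simp, hq.symm, h⟩
          · exact Or.inr ⟨p, by simp [hp], h1, h2⟩
        · rintro (hm | ⟨p, hp, h1, h2⟩)
          · exact Or.inl (Or.inl hm)
          · rcases List.mem_cons.mp hp with rfl | hp'
            · exact Or.inl (Or.inr h1.symm)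
            · exact Or.inr ⟨p, hp', h1, h2⟩
      · rw [if_neg h, ih]
        constructor
        · rintro (hm | ⟨p, hp, h1, h2⟩)
          · exact Or.inl hm
          · exact Or.inr ⟨p, by simp [hp], h1, h2⟩
        · rintro (hm | ⟨p, hp, h1, h2⟩)
          · exact Or.inl hm
          · rcases List.mem_cons.mp hp with rfl | hp'
            · exact absurd h2 h
            · exact Or.inr ⟨p, hp', h1, h2⟩

-- Membership in the full matched-index set.
theorem pv_mark_all (al : List String) (ps : List (Int × String)) (m : PySem.Set Int) (i : Int) :
    (i ∈ al.foldl (fun m e =>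
        ps.foldl (fun m p => if PySem.Str.isIn e p.2 then PySem.Set.add m p.1 else m) m) m)
    ↔ i ∈ m ∨ ∃ e ∈ al, ∃ p ∈ ps, p.1 = i ∧ PySem.Str.isIn e p.2 = true := by
  induction al generalizing m with
  | nil => simp
  | cons e rest ih =>
      simp only [List.foldl_cons]
      rw [ih]
      rw [pv_mark_one]
      constructor
      · rintro (⟨hm | ⟨p, hp, h1, h2⟩⟩ | ⟨f, hf, hrest⟩)
        · exact Or.inl hm
        · exact Or.inr ⟨e, by simp, p, hp, h1, h2⟩
        · exact Or.inr ⟨f, by simp [hf], hrest⟩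
      · rintro (hm | ⟨f, hf, hrest⟩)
        · exact Or.inl (Or.inl hm)
        · rcases List.mem_cons.mp hf with rfl | hf'
          · exact Or.inl (Or.inr hrest)
          · exact Or.inr ⟨f, hf', hrest⟩

-- The matched set answers exactly the per-item any-test, for pairs of enumerate.
theorem pv_matched_char (al : List String) (il : List String) (p : Int × String)
    (hp : p ∈ PySem.List.enumerate il 0) :
    PySem.Set.contains
      (al.foldl (fun (m : PySem.Set Int) e =>
        (PySem.List.enumerate (il.map PySem.Str.lower) 0).foldl
          (fun m q => if PySem.Str.isIn e q.2 then PySem.Set.add m q.1 else m) m)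
        PySem.Set.empty) p.1
    = al.any (fun e => PySem.Str.isIn e (PySem.Str.lower p.2)) := by
  rcases (PySem.List.mem_enumerate_iff _ _ _).mp hp with ⟨k, hk, rfl⟩
  rw [Bool.eq_iff_iff, PySem.Set.contains_iff, pv_mark_all, List.any_eq_true]
  simp only [PySem.Set.empty, List.not_mem_nil, false_or]
  constructor
  · rintro ⟨e, he, q, hq, h1, h2⟩
    refine ⟨e, he, ?_⟩
    rcases (PySem.List.mem_enumerate_iff _ _ _).mp hq with ⟨j, hj, rfl⟩
    have hjk : j = k := by
      have := h1
      simp only [Int.zero_add] at this ⊢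
      exact_mod_cast this
    subst hjk
    simpa [List.getElem_map] using h2
  · rintro ⟨e, he, h⟩
    refine ⟨e, he, ((0 : Int) + k, (il.map PySem.Str.lower)[k]'(by simpa using hk)), ?_, rfl, ?_⟩
    · exact (PySem.List.mem_enumerate_iff _ _ _).mpr ⟨k, by simpa using hk, rfl⟩
    · simpa [List.getElem_map] using h

-- The emit pass equals the plain filtered dedup fold, given the matched set is right
-- on every pair and the seen set mirrors the accumulator.
theorem pv_emit (al : List String) (matched : PySem.Set Int) (l : List (Int × String))
    (s : PySem.Set String) (acc : List String)
    (H : ∀ p ∈ l, PySem.Set.contains matched p.1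
          = al.any (fun e => PySem.Str.isIn e (PySem.Str.lower p.2)))
    (hinv : ∀ y, y ∈ s ↔ y ∈ acc) :
    (l.foldl (fun (st : PySem.Set String × List String) p =>
        if PySem.Set.contains matched p.1 && !PySem.Set.contains st.1 p.2 then
          (PySem.Set.add st.1 p.2, st.2 ++ [p.2])
        else st) (s, acc)).2
    = l.foldl (fun acc p =>
        if al.any (fun e => PySem.Str.isIn e (PySem.Str.lower p.2)) then
          (if p.2 ∈ acc then acc else acc ++ [p.2])
        else acc) acc := by
  induction l generalizing s acc with
  | nil => rfl
  | cons p rest ih =>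
      simp only [List.foldl_cons]
      have hm := H p (by simp)
      rw [hm]
      by_cases ha : al.any (fun e => PySem.Str.isIn e (PySem.Str.lower p.2)) = true
      · rw [ha]
        by_cases hx : p.2 ∈ acc
        · have hc : PySem.Set.contains s p.2 = true :=
            (PySem.Set.contains_iff s p.2).mpr ((hinv p.2).mpr hx)
          simp only [hc, Bool.not_true, Bool.and_false, if_pos hx]
          rw [if_neg (by simp)]
          exact ih s acc (fun p hp => H p (by simp [hp])) hinv
        · have hc : PySem.Set.contains s p.2 = false := by
            by_contra h
            exact hx ((hinv p.2).mp ((PySem.Set.contains_iff s p.2).mp (by simpa using h)))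
          simp only [hc, Bool.not_false, Bool.and_true, if_neg hx]
          rw [if_pos (by simp)]
          exact ih (PySem.Set.add s p.2) (acc ++ [p.2])
            (fun p hp => H p (by simp [hp]))
            (fun y => by simp [PySem.Set.mem_add, hinv y])
      · have ha' : al.any (fun e => PySem.Str.isIn e (PySem.Str.lower p.2)) = false := by
          simpa using ha
        rw [ha']
        rw [if_neg (by simp)]
        exact ih s acc (fun p hp => H p (by simp [hp])) hinv

-- enumerate's second components are the list itself, so folding over pairs by .2
-- is folding over the list.
theorem pv_fold_enum_snd {α : Type} (il : List String) (g : α → String → α) (init : α) :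
    (PySem.List.enumerate il 0).foldl (fun a p => g a p.2) init = il.foldl g init := by
  conv_rhs => rw [← PySem.List.map_snd_enumerate il 0]
  rw [List.foldl_map]

-- ===== VERDICT =====
theorem whitelist_ip_and_uris_spec : Claim_equal_whitelist_ip_and_uris := by
  intro allow_list ip_and_uri_list _
  unfold Spec_whitelist_ip_and_uris whitelist_ip_and_uris whitelist_ip_and_uris_alt
  simp only []
  rw [pv_emit allow_list _ _ _ _
      (fun p hp => pv_matched_char allow_list ip_and_uri_list p hp)
      (fun y => by simp [PySem.Set.empty])]
  rw [pv_fold_enum_snd ip_and_uri_list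
      (fun acc u =>
        if allow_list.any (fun e => PySem.Str.isIn e (PySem.Str.lower u)) then
          (if u ∈ acc then acc else acc ++ [u])
        else acc) []]
  have hbody : (fun (clean : List String) (ip_uri : String) =>
      allow_list.foldl (fun clean entry =>
        if PySem.Str.isIn entry (PySem.Str.lower ip_uri) then
          (if ip_uri ∈ clean then clean else clean ++ [ip_uri])
        else clean) clean)
    = fun clean ip_uri =>
        if allow_list.any (fun entry => PySem.Str.isIn entry (PySem.Str.lower ip_uri)) then
          (if ip_uri ∈ clean then clean else clean ++ [ip_uri])
        else clean := by
    funext clean ip_uri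
    exact pv_inner_eq ip_uri allow_list clean
  rw [hbody]
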